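-- pv_equiv track=rewrite | github.com/coryshain/dnnseg | dnnseg/data.py | score_text_lexicon
-- ===== SOURCE A (Python) =====
-- def score_text_lexicon(true, pred):
--     lex_true = set()
--     lex_pred = set()
--
--     for w_true, w_pred in zip(true, pred):
--         for word in w_true:
--             if type(word) == list:
--                 word = tuple(word)
--             lex_true.add(word)
--
--         for word in w_pred:
--             if type(word) == list:
--                 word = tuple(word)
--             lex_pred.add(word)
--
--     tp = len(lex_true.intersection(lex_pred))
--     fp = len(lex_pred - lex_true)
--     fn = len(lex_true - lex_pred)
--
--     return tp, fp, fn
-- ===== SOURCE B (Python) =====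
-- def _lexicon(rows):
--     # flatten the rows into one word list (normalising list-typed words to tuples),
--     # dedupe keeping first occurrences, then sort
--     words = [tuple(word) if type(word) == list else word for row in rows for word in row]
--     return sorted(dict.fromkeys(words))
--
--
-- def score_text_lexicon(true, pred):
--     n = min(len(true), len(pred))
--     xs = _lexicon(true[:n])
--     ys = _lexicon(pred[:n])
--     # two-pointer merge of the two sorted, duplicate-free lexicons
--     tp = fp = fn = 0
--     i = j = 0
--     while i < len(xs) and j < len(ys):
--         if xs[i] == ys[j]:
--             tp += 1
--             i += 1
--             j += 1
--         elif xs[i] < ys[j]: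
--             fn += 1
--             i += 1
--         else:
--             fp += 1
--             j += 1
--     return tp, fp + (len(ys) - j), fn + (len(xs) - i)
-- ===== Notes on version B (the rewrite author's own statement) =====
-- stated objective: alternative
-- what changed: Replaces hash sets and set operations by a comparison-based algorithm: flatten each zip-truncated side into a word list, dedupe and sort it, then count tp/fp/fn in a single two-pointer merge of the two sorted lexicons.
import Mathlib
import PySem

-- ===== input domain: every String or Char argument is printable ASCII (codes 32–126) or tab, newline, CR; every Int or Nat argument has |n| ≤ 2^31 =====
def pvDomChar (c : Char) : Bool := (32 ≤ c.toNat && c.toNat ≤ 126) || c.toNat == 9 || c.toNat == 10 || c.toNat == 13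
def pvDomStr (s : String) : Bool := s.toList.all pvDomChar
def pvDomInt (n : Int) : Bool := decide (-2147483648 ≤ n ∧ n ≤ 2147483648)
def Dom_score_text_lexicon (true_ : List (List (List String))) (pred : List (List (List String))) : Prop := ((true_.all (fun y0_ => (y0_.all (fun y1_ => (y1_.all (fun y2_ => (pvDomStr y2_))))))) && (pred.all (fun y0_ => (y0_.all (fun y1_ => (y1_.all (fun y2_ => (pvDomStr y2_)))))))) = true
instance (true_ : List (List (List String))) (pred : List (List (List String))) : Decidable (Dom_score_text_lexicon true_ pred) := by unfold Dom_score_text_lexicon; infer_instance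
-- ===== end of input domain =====

-- B replaces A's hash sets and set operations by a comparison-based algorithm: flatten each
-- zip-truncated side, dedupe and sort it, then count tp/fp/fn in one two-pointer merge ('alternative').

-- ===== PORT A =====
-- Words arrive typed List String, so Python's `if type(word) == list: word = tuple(word)`
-- always fires and the list→tuple normalisation is the identity on the Lean value.
def score_text_lexicon (true_ : List (List (List String))) (pred : List (List (List String))) : Int × Int × Int :=
  let lexes := (true_.zip pred).foldl
    (fun (st : PySem.Set (List String) × PySem.Set (List String)) wp =>
      (wp.1.foldl (fun s word => PySem.Set.add s word) st.1,
       wp.2.foldl (fun s word => PySem.Set.add s word) st.2))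
    (PySem.Set.empty, PySem.Set.empty)
  let tp := PySem.Set.len (PySem.Set.inter lexes.1 lexes.2)
  let fp := PySem.Set.len (PySem.Set.diff lexes.2 lexes.1)
  let fn := PySem.Set.len (PySem.Set.diff lexes.1 lexes.2)
  (tp, fp, fn)

-- ===== PORT B =====
-- Same identity note for the `type(word) == list` normalisation as in port A.
-- `rows` flattened by the comprehension, dict.fromkeys dedup = PySem.List.dedup, then sorted.
def pvLexicon (rows : List (List (List String))) : List (List String) :=
  PySem.List.sorted
    (PySem.List.dedup (rows.flatMap (fun row => row.map (fun word => word))))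
    (fun x => x) false

-- the two-pointer while loop of Source B as a recursion over the two list fronts;
-- the catch-all arm is the loop exit adding the remaining lengths to fp/fn
def pvMerge : List (List String) → List (List String) → Int → Int → Int → Int × Int × Int
  | x :: xs, y :: ys, tp, fp, fn =>
      if x = y then pvMerge xs ys (tp + 1) fp fn
      else if x < y then pvMerge xs (y :: ys) tp fp (fn + 1)
      else pvMerge (x :: xs) ys tp (fp + 1) fn
  | xs, ys, tp, fp, fn => (tp, fp + (ys.length : Int), fn + (xs.length : Int))
  termination_by xs ys _ _ _ => xs.length + ys.length

-- true[:n] / pred[:n] with n = min(len(true), len(pred)) is List.take n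
def score_text_lexicon_alt (true_ : List (List (List String))) (pred : List (List (List String))) : Int × Int × Int :=
  let n := min true_.length pred.length
  pvMerge (pvLexicon (true_.take n)) (pvLexicon (pred.take n)) 0 0 0

-- ===== PRECONDITION & SPEC =====
def Spec_score_text_lexicon (true_ : List (List (List String))) (pred : List (List (List String))) (out : Int × Int × Int) : Prop := out = score_text_lexicon_alt true_ pred
instance (true_ : List (List (List String))) (pred : List (List (List String))) (out : Int × Int × Int) : Decidable (Spec_score_text_lexicon true_ pred out) := by unfold Spec_score_text_lexicon; infer_instance

-- ===== CLAIM (what is proved, stated in full; the proofs are below) =====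
def Claim_equal_score_text_lexicon : Prop := ∀ (true_ : List (List (List String))) (pred : List (List (List String))), Dom_score_text_lexicon true_ pred → Spec_score_text_lexicon true_ pred (score_text_lexicon true_ pred)

-- ===== LEMMAS AND PROOFS =====

-- zip projections are the zip-truncated inputs
lemma pvMapFstZip {α β : Type} : ∀ (l1 : List α) (l2 : List β),
    (l1.zip l2).map Prod.fst = l1.take (min l1.length l2.length) := by
  intro l1
  induction l1 with
  | nil => intro l2; simp
  | cons a l1 ih =>
      intro l2
      cases l2 with
      | nil => simp
      | cons b l2 => simp [ih l2, Nat.succ_min_succ]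

lemma pvMapSndZip {α β : Type} : ∀ (l1 : List α) (l2 : List β),
    (l1.zip l2).map Prod.snd = l2.take (min l1.length l2.length) := by
  intro l1
  induction l1 with
  | nil => intro l2; simp
  | cons a l1 ih =>
      intro l2
      cases l2 with
      | nil => simp
      | cons b l2 => simp [ih l2, Nat.succ_min_succ]

-- A's paired fold splits into two independent folds over the projections
lemma pvFoldPair (l : List (List (List String) × List (List String)))
    (s t : PySem.Set (List String)) :
    l.foldl (fun (st : PySem.Set (List String) × PySem.Set (List String)) wp =>
      (wp.1.foldl (fun s word => PySem.Set.add s word) st.1,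
       wp.2.foldl (fun s word => PySem.Set.add s word) st.2)) (s, t)
    = ((l.map Prod.fst).foldl (fun s row => row.foldl (fun s word => PySem.Set.add s word) s) s,
       (l.map Prod.snd).foldl (fun s row => row.foldl (fun s word => PySem.Set.add s word) s) t) := by
  induction l generalizing s t with
  | nil => rfl
  | cons wp l ih => simp [ih]

lemma pvRowMem (row : List (List String)) (s : PySem.Set (List String)) (w : List String) :
    w ∈ row.foldl (fun s word => PySem.Set.add s word) s ↔ w ∈ s ∨ w ∈ row := by
  induction row generalizing s with
  | nil => simp
  | cons x row ih =>
      simp only [List.foldl_cons, ih, PySem.Set.mem_add, List.mem_cons]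
      tauto

lemma pvRowNodup (row : List (List String)) (s : PySem.Set (List String)) (h : s.Nodup) :
    (row.foldl (fun s word => PySem.Set.add s word) s).Nodup := by
  induction row generalizing s with
  | nil => exact h
  | cons x row ih => exact ih _ (PySem.Set.nodup_add s x h)

lemma pvRowsMem (rows : List (List (List String))) (s : PySem.Set (List String)) (w : List String) :
    w ∈ rows.foldl (fun s row => row.foldl (fun s word => PySem.Set.add s word) s) s
      ↔ w ∈ s ∨ w ∈ rows.flatMap (fun r => r) := by
  induction rows generalizing s with
  | nil => simp
  | cons row rows ih =>
      simp only [List.foldl_cons, ih, pvRowMem, List.flatMap_cons, List.mem_append]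
      tauto

lemma pvRowsNodup (rows : List (List (List String))) (s : PySem.Set (List String)) (h : s.Nodup) :
    (rows.foldl (fun s row => row.foldl (fun s word => PySem.Set.add s word) s) s).Nodup := by
  induction rows generalizing s with
  | nil => exact h
  | cons row rows ih => exact ih _ (pvRowNodup row s h)

-- B's lexicon: strictly sorted, and holds exactly the words of its rows
lemma pvLexicon_pairwise (rows : List (List (List String))) :
    (pvLexicon rows).Pairwise (· < ·) := by
  unfold pvLexicon
  rw [PySem.List.dedup_eq_ofList (rows.flatMap (fun row => row.map (fun word => word)))]
  convert PySem.List.sorted_ofList_pairwise_lt (rows.flatMap (fun row => row.map (fun word => word))) using 2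

lemma pvLexicon_mem (rows : List (List (List String))) (w : List String) :
    w ∈ pvLexicon rows ↔ w ∈ rows.flatMap (fun r => r) := by
  unfold pvLexicon
  simp [PySem.List.mem_sorted]

lemma pvLexicon_nodup (rows : List (List (List String))) : (pvLexicon rows).Nodup :=
  (pvLexicon_pairwise rows).imp (fun h => ne_of_lt h)

-- two nodup lists with the same members have the same length
lemma pvLen_eq {α : Type} [DecidableEq α] (u v : List α) (hu : u.Nodup) (hv : v.Nodup)
    (h : ∀ w, w ∈ u ↔ w ∈ v) : u.length = v.length :=
  ((List.perm_ext_iff_of_nodup hu hv).mpr h).length_eq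

-- the merge loop on strictly sorted inputs counts shared / pred-only / true-only words
lemma pvMerge_spec : ∀ (N : Nat) (xs ys : List (List String)) (tp fp fn : Int),
    xs.length + ys.length ≤ N → xs.Pairwise (· < ·) → ys.Pairwise (· < ·) →
    pvMerge xs ys tp fp fn =
      (tp + (xs.countP (fun w => decide (w ∈ ys)) : Int),
       fp + (ys.countP (fun w => decide (w ∉ xs)) : Int),
       fn + (xs.countP (fun w => decide (w ∉ ys)) : Int)) := by
  intro N
  induction N with
  | zero =>
      intro xs ys tp fp fn hN _ _
      have hx : xs = [] := List.eq_nil_of_length_eq_zero (by omega)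
      have hy : ys = [] := List.eq_nil_of_length_eq_zero (by omega)
      subst hx; subst hy
      simp [pvMerge]
  | succ N ih =>
      intro xs ys tp fp fn hN hxs hys
      match xs, ys with
      | [], ys => simp [pvMerge]
      | x :: xs, [] => simp [pvMerge]
      | x :: xs, y :: ys =>
          obtain ⟨hxh, hxt⟩ := List.pairwise_cons.mp hxs
          obtain ⟨hyh, hyt⟩ := List.pairwise_cons.mp hys
          by_cases hxy : x = y
          · subst hxy
            rw [pvMerge, if_pos rfl,
                ih xs ys (tp + 1) fp fn (by simp at hN ⊢; omega) hxt hyt]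
            have c1 : xs.countP (fun w => decide (w ∈ x :: ys)) = xs.countP (fun w => decide (w ∈ ys)) := by
              apply List.countP_congr
              intro w hw
              have : w ≠ x := fun h => absurd (hxh w hw) (by simp [h])
              simp [this]
            have c2 : ys.countP (fun w => decide (w ∉ x :: xs)) = ys.countP (fun w => decide (w ∉ xs)) := by
              apply List.countP_congr
              intro w hw
              have : w ≠ x := fun h => absurd (hyh w hw) (by simp [h])
              simp [this]
            have c3 : xs.countP (fun w => decide (w ∉ x :: ys)) = xs.countP (fun w => decide (w ∉ ys)) := by
              apply List.countP_congr
              intro w hw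
              have : w ≠ x := fun h => absurd (hxh w hw) (by simp [h])
              simp [this]
            simp only [List.countP_cons, c1, c2, c3]
            refine Prod.ext ?_ (Prod.ext ?_ ?_) <;> simp <;> ring
          · by_cases hlt : x < y
            · have hxnotin : x ∉ y :: ys := by
                intro hmem
                rcases List.mem_cons.mp hmem with h | h
                · exact absurd (h ▸ hlt) (lt_irrefl y)
                · exact absurd (lt_trans hlt (hyh x h)) (lt_irrefl x)
              rw [pvMerge, if_neg hxy, if_pos hlt,
                  ih xs (y :: ys) tp fp (fn + 1) (by simp at hN ⊢; omega) hxt hys]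
              have c2 : (y :: ys).countP (fun w => decide (w ∉ x :: xs)) = (y :: ys).countP (fun w => decide (w ∉ xs)) := by
                apply List.countP_congr
                intro w hw
                have : w ≠ x := by
                  intro he
                  rcases List.mem_cons.mp hw with h | h
                  · exact hxy (he.symm.trans h)
                  · rw [he] at h; exact lt_asymm hlt (hyh x h)
                simp [this]
              simp only [List.countP_cons, c2, hxnotin]
              refine Prod.ext ?_ (Prod.ext ?_ ?_) <;> simp <;> ring
            · have hylt : y < x := lt_of_le_of_ne (not_lt.mp hlt) (fun h => hxy h.symm)
              have hynotin : y ∉ x :: xs := by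
                intro hmem
                rcases List.mem_cons.mp hmem with h | h
                · exact absurd (h ▸ hylt) (lt_irrefl x)
                · exact absurd (lt_trans hylt (hxh y h)) (lt_irrefl y)
              rw [pvMerge, if_neg hxy, if_neg hlt,
                  ih (x :: xs) ys tp (fp + 1) fn (by simp at hN ⊢; omega) hxs hyt]
              have c1 : (x :: xs).countP (fun w => decide (w ∈ y :: ys)) = (x :: xs).countP (fun w => decide (w ∈ ys)) := by
                apply List.countP_congr
                intro w hw
                have : w ≠ y := by
                  intro he
                  rcases List.mem_cons.mp hw with h | h
                  · exact hxy (h.symm.trans he)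
                  · rw [he] at h; exact lt_asymm hylt (hxh y h)
                simp [this]
              have c3 : (x :: xs).countP (fun w => decide (w ∉ y :: ys)) = (x :: xs).countP (fun w => decide (w ∉ ys)) := by
                apply List.countP_congr
                intro w hw
                have : w ≠ y := by
                  intro he
                  rcases List.mem_cons.mp hw with h | h
                  · exact hxy (h.symm.trans he)
                  · rw [he] at h; exact lt_asymm hylt (hxh y h)
                simp [this]
              simp only [List.countP_cons, c1, c3, hynotin]
              refine Prod.ext ?_ (Prod.ext ?_ ?_) <;> simp <;> ring

-- ===== VERDICT (by name: the statement is the Claim_ definition above) =====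
theorem score_text_lexicon_spec : Claim_equal_score_text_lexicon := by
  intro true_ pred _
  unfold Spec_score_text_lexicon score_text_lexicon score_text_lexicon_alt
  simp only [pvFoldPair, pvMapFstZip, pvMapSndZip]
  set n := min true_.length pred.length with hn
  set st := ((true_.take n).foldl (fun s row => row.foldl (fun s word => PySem.Set.add s word) s) PySem.Set.empty) with hst
  set sp := ((pred.take n).foldl (fun s row => row.foldl (fun s word => PySem.Set.add s word) s) PySem.Set.empty) with hsp
  set xs := pvLexicon (true_.take n) with hxs
  set ys := pvLexicon (pred.take n) with hys
  have hstm : ∀ w, w ∈ st ↔ w ∈ xs := by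
    intro w
    rw [hst, pvRowsMem, pvLexicon_mem]
    simp [PySem.Set.empty]
  have hspm : ∀ w, w ∈ sp ↔ w ∈ ys := by
    intro w
    rw [hsp, pvRowsMem, pvLexicon_mem]
    simp [PySem.Set.empty]
  have hstn : st.Nodup := pvRowsNodup _ _ List.nodup_nil
  have hspn : sp.Nodup := pvRowsNodup _ _ List.nodup_nil
  rw [pvMerge_spec (xs.length + ys.length) xs ys 0 0 0 le_rfl
        (pvLexicon_pairwise _) (pvLexicon_pairwise _)]
  have htp : (PySem.Set.inter st sp).length = xs.countP (fun w => decide (w ∈ ys)) := by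
    rw [List.countP_eq_length_filter]
    refine pvLen_eq _ _ (PySem.Set.nodup_inter st sp hstn) ((pvLexicon_nodup _).filter _) ?_
    intro w
    rw [PySem.Set.mem_inter, List.mem_filter, hstm w, hspm w]
    simp
  have hfp : (PySem.Set.diff sp st).length = ys.countP (fun w => decide (w ∉ xs)) := by
    rw [List.countP_eq_length_filter]
    refine pvLen_eq _ _ (PySem.Set.nodup_diff sp st hspn) ((pvLexicon_nodup _).filter _) ?_
    intro w
    rw [PySem.Set.mem_diff, List.mem_filter, hstm w, hspm w]
    simp
  have hfn : (PySem.Set.diff st sp).length = xs.countP (fun w => decide (w ∉ ys)) := by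
    rw [List.countP_eq_length_filter]
    refine pvLen_eq _ _ (PySem.Set.nodup_diff st sp hstn) ((pvLexicon_nodup _).filter _) ?_
    intro w
    rw [PySem.Set.mem_diff, List.mem_filter, hstm w, hspm w]
    simp
  simp [PySem.Set.len, htp, hfp, hfn]
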